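-- pv_equiv track=rewrite | github.com/bantic/jupyter-notebooks | code-forces/contest-1368/b.py | solve
-- ===== SOURCE A (Python) =====
-- def mult(arr):
--     out = 1
--     for i in arr:
--         out *= i
--     return out
--
-- def solve(k):
--     repeats = [1 for _ in range(len('codeforces'))]
--     next_idx = -1
--     while k > mult(repeats):
--         next_idx += 1
--         next_idx = next_idx % len('codeforces')
--         repeats[next_idx] += 1
--     repeats = [i*'codeforces'[idx] for (idx,i) in enumerate(repeats)]
--     return ''.join(repeats)
-- ===== SOURCE B (Python) =====
-- def solve(k):
--     # After r round-robin increments the counts are q+2 for the first rem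
--     # letters and q+1 for the rest, where q, rem = divmod(r, 10).  The product
--     # is monotone in r, so binary-search for the smallest r whose product >= k.
--     def product(r):
--         q, rem = divmod(r, 10)
--         return (q + 2) ** rem * (q + 1) ** (10 - rem)
--
--     hi = 1
--     while product(hi) < k:
--         hi *= 2
--     lo = 0
--     while lo < hi:
--         mid = (lo + hi) // 2
--         if product(mid) >= k:
--             hi = mid
--         else:
--             lo = mid + 1
--     q, rem = divmod(lo, 10)
--     return ''.join(ch * (q + 2 if i < rem else q + 1)
--                    for i, ch in enumerate('codeforces'))
-- ===== Notes on version B (the rewrite author's own statement) =====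
-- stated objective: faster
-- what changed: Replaces A's unit-by-unit round-robin increment loop with a closed-form product formula ((q+2)^rem*(q+1)^(10-rem) for r = 10q+rem total increments) and a doubling + binary search for the smallest qualifying r, then builds the string directly from q and rem.
import Mathlib
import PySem

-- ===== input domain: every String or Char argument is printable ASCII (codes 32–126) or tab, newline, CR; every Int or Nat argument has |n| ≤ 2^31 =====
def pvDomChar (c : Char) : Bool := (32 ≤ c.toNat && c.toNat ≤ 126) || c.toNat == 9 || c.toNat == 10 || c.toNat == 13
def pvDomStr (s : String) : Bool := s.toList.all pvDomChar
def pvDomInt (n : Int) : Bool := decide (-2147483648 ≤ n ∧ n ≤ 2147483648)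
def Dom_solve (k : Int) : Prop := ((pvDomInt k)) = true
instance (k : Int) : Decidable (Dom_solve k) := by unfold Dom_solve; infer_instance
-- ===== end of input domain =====

-- B replaces A's unit-by-unit round-robin loop with a closed-form product and a
-- doubling + binary search for the smallest number of increments (O(log k) product
-- evaluations instead of A's O(k^(1/10)) loop iterations).

-- the letters of 'codeforces' (len = 10)
def cfChars : List Char := ['c', 'o', 'd', 'e', 'f', 'o', 'r', 'c', 'e', 's']

-- ===== PORT A =====
def mult (arr : List Int) : Int := arr.foldl (fun out i => out * i) 1

-- the while-loop of A; fuel only makes the recursion structural (the loop runs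
-- at most k times since the product grows by at least 1 each iteration)
def solveLoopA (k : Int) (fuel : Nat) (repeats : List Int) (next_idx : Int) : List Int :=
  match fuel with
  | 0 => repeats
  | f + 1 =>
    if k > mult repeats then
      let ni := PySem.Int.mod (next_idx + 1) 10
      solveLoopA k f (PySem.List.pySetD repeats ni (PySem.List.pyGetD repeats ni 0 + 1)) ni
    else repeats

def solve (k : Int) : String :=
  let repeats := (List.range 10).map (fun _ => (1 : Int))
  let repeats := solveLoopA k k.toNat repeats (-1)
  String.ofList (PySem.Chars.join []
    ((PySem.List.enumerate repeats 0).map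
      (fun p => PySem.List.pyRepeat [PySem.List.pyGetD cfChars p.1 ' '] p.2)))

-- ===== PORT B =====
-- product(r) of Source B: q, rem = divmod(r, 10); (q+2)**rem * (q+1)**(10-rem)
def prodB (r : Int) : Int :=
  let q := PySem.Int.floordiv r 10
  let rem := PySem.Int.mod r 10
  (q + 2) ^ rem.toNat * (q + 1) ^ (10 - rem).toNat

-- 'while product(hi) < k: hi *= 2' (fuel makes it structural)
def doublingB (k : Int) (fuel : Nat) (hi : Int) : Int :=
  match fuel with
  | 0 => hi
  | f + 1 => if prodB hi < k then doublingB k f (hi * 2) else hi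

-- 'while lo < hi: …' binary search (fuel makes it structural)
def bsearchB (k : Int) (fuel : Nat) (lo hi : Int) : Int :=
  match fuel with
  | 0 => lo
  | f + 1 =>
    if lo < hi then
      let mid := PySem.Int.floordiv (lo + hi) 2
      if prodB mid ≥ k then bsearchB k f lo mid else bsearchB k f (mid + 1) hi
    else lo

def solve_alt (k : Int) : String :=
  let hi := doublingB k k.toNat 1
  let r := bsearchB k hi.toNat 0 hi
  let q := PySem.Int.floordiv r 10
  let rem := PySem.Int.mod r 10
  String.ofList (PySem.Chars.join []
    ((PySem.List.enumerate cfChars 0).map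
      (fun p => PySem.List.pyRepeat [p.2] (if p.1 < rem then q + 2 else q + 1))))

-- ===== PRECONDITION & SPEC =====
def Spec_solve (k : Int) (out : String) : Prop := out = solve_alt k
instance (k : Int) (out : String) : Decidable (Spec_solve k out) := by unfold Spec_solve; infer_instance

-- ===== CLAIM (what is proved, stated in full; the proofs are below) =====
def Claim_equal_solve : Prop := ∀ (k : Int), Dom_solve k → Spec_solve k (solve k)

-- ===== LEMMAS AND PROOFS =====

-- counts after t round-robin increments
def countsA (t : Nat) : List Int :=
  (List.range 10).map (fun i => (1 : Int) + (t / 10 : Nat) + (if i < t % 10 then 1 else 0))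

-- closed-form product of countsA t
def prodN (t : Nat) : Int := ((t / 10 : Nat) + 2) ^ (t % 10) * ((t / 10 : Nat) + 1) ^ (10 - t % 10)

theorem mult_countsA (t : Nat) : mult (countsA t) = prodN t := by
  have h10 : List.range 10 = [0,1,2,3,4,5,6,7,8,9] := by decide
  have hlt : t % 10 < 10 := Nat.mod_lt _ (by norm_num)
  simp only [mult, countsA, prodN, h10, List.map, List.foldl]
  interval_cases h : t % 10 <;> simp <;> ring

theorem prodN_succ_gt (t : Nat) : prodN t < prodN (t + 1) := by
  by_cases h : t % 10 = 9
  · have hd : (t + 1) / 10 = t / 10 + 1 := by omega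
    have hm : (t + 1) % 10 = 0 := by omega
    rw [prodN, prodN, hd, hm, h]
    have hp : (0 : Int) < (((t / 10 : Nat) : Int) + 2) ^ 9 := by positivity
    have h10 : (10 : Nat) - 0 = 9 + 1 := by omega
    rw [h10, pow_succ]
    push_cast at hp ⊢
    nlinarith [hp]
  · have hd : (t + 1) / 10 = t / 10 := by omega
    have hm : (t + 1) % 10 = t % 10 + 1 := by omega
    rw [prodN, prodN, hd, hm]
    have h1 : 10 - t % 10 = (9 - t % 10) + 1 := by omega
    have h2 : 10 - (t % 10 + 1) = 9 - t % 10 := by omega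
    rw [h1, h2, pow_succ, pow_succ]
    have hp : (0 : Int) < (((t / 10 : Nat) : Int) + 2) ^ (t % 10) * (((t / 10 : Nat) : Int) + 1) ^ (9 - t % 10) := by
      positivity
    nlinarith [hp]

theorem prodN_mono {s t : Nat} (h : s ≤ t) : prodN s ≤ prodN t := by
  induction h with
  | refl => exact le_refl _
  | step h ih => exact le_trans ih (le_of_lt (prodN_succ_gt _))

theorem prodN_ge (t : Nat) : (t : Int) + 1 ≤ prodN t := by
  induction t with
  | zero => simp [prodN]
  | succ n ih =>
    have := prodN_succ_gt n
    push_cast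
    omega

theorem prodN_exists (k : Int) : ∃ r, k ≤ prodN r := by
  refine ⟨k.toNat, ?_⟩
  have := prodN_ge k.toNat
  omega

-- the smallest number of increments whose product reaches k
def Rk (k : Int) : Nat := Nat.find (prodN_exists k)

theorem Rk_spec (k : Int) : k ≤ prodN (Rk k) := Nat.find_spec (prodN_exists k)
theorem Rk_min {k : Int} {t : Nat} (h : k ≤ prodN t) : Rk k ≤ t := Nat.find_min' _ h
theorem Rk_lt {k : Int} {t : Nat} (h : prodN t < k) : t < Rk k := by
  by_contra hc
  exact absurd (le_trans (Rk_spec k) (prodN_mono (Nat.le_of_not_lt hc))) (by omega)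

theorem Rk_le_toNat (k : Int) : Rk k ≤ k.toNat := Rk_min (by have := prodN_ge k.toNat; omega)

theorem countsA_step (t : Nat) :
    PySem.List.pySetD (countsA t) ((t % 10 : Nat) : Int)
      (PySem.List.pyGetD (countsA t) ((t % 10 : Nat) : Int) 0 + 1) = countsA (t + 1) := by
  rw [PySem.List.pySetD_natCast, PySem.List.pyGetD_natCast]
  have hlt : t % 10 < 10 := by omega
  have hget : (countsA t).getD (t % 10) 0 = 1 + ((t / 10 : Nat) : Int) := by
    simp [countsA, List.getD_eq_getElem?_getD, hlt]
  rw [hget]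
  apply List.ext_getElem
  · simp [countsA]
  · intro i h1 h2
    have hi : i < 10 := by simpa [countsA] using h2
    simp only [countsA, List.getElem_set, List.getElem_map, List.getElem_range]
    split_ifs <;> omega

-- A's loop lands on countsA (Rk k)
theorem loopA_eq (k : Int) : ∀ (fuel t : Nat) (ni : Int),
    t ≤ Rk k → Rk k ≤ t + fuel → PySem.Int.mod (ni + 1) 10 = ((t % 10 : Nat) : Int) →
    solveLoopA k fuel (countsA t) ni = countsA (Rk k) := by
  intro fuel
  induction fuel with
  | zero =>
    intro t ni h1 h2 _
    have : t = Rk k := le_antisymm h1 (by omega)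
    simp [solveLoopA, this]
  | succ f ih =>
    intro t ni h1 h2 hni
    by_cases hg : k > mult (countsA t)
    · have hlt : t < Rk k := Rk_lt (by rw [← mult_countsA]; omega)
      have hstep : PySem.List.pySetD (countsA t) (PySem.Int.mod (ni + 1) 10)
          (PySem.List.pyGetD (countsA t) (PySem.Int.mod (ni + 1) 10) 0 + 1) = countsA (t + 1) := by
        rw [hni]; exact countsA_step t
      have hni' : PySem.Int.mod (((t % 10 : Nat) : Int) + 1) 10 = (((t + 1) % 10 : Nat) : Int) := by
        rw [PySem.Int.mod_eq_emod_of_pos (by norm_num)]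
        omega
      rw [solveLoopA, if_pos hg, hni]
      show solveLoopA k f (PySem.List.pySetD (countsA t) ((t % 10 : Nat) : Int)
        (PySem.List.pyGetD (countsA t) ((t % 10 : Nat) : Int) 0 + 1)) ((t % 10 : Nat) : Int) = countsA (Rk k)
      rw [countsA_step t]
      exact ih (t + 1) _ hlt (by omega) hni'
    · have : Rk k ≤ t := Rk_min (by rw [← mult_countsA]; omega)
      have ht : t = Rk k := le_antisymm h1 this
      rw [solveLoopA, if_neg hg, ht]

-- prodB agrees with prodN on nonnegative arguments
theorem prodB_natCast (m : Nat) : prodB ((m : Nat) : Int) = prodN m := by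
  simp only [prodB, prodN]
  rw [PySem.Int.floordiv_eq_ediv_of_pos (by norm_num), PySem.Int.mod_eq_emod_of_pos (by norm_num)]
  have e1 : ((m : Nat) : Int) / 10 = ((m / 10 : Nat) : Int) := by omega
  have e2 : ((m : Nat) : Int) % 10 = ((m % 10 : Nat) : Int) := by omega
  have h1 : (((m % 10 : Nat) : Int)).toNat = m % 10 := by omega
  have h2 : ((10 : Int) - ((m % 10 : Nat) : Int)).toNat = 10 - m % 10 := by omega
  rw [e1, e2, h1, h2]

theorem prodB_ge (h : (0:Int) ≤ r) : r + 1 ≤ prodB r := by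
  have : r = ((r.toNat : Nat) : Int) := by omega
  rw [this, prodB_natCast]
  have := prodN_ge r.toNat
  omega

-- the doubling loop returns some hi ≥ 1 whose product reaches k
theorem doublingB_spec (k : Int) : ∀ (fuel : Nat) (hi : Int), 1 ≤ hi →
    (k - hi).toNat ≤ fuel →
    1 ≤ doublingB k fuel hi ∧ k ≤ prodB (doublingB k fuel hi) := by
  intro fuel
  induction fuel with
  | zero =>
    intro hi h1 h2
    have : k ≤ hi := by omega
    have := prodB_ge (r := hi) (by omega)
    simp only [doublingB]
    exact ⟨h1, by omega⟩
  | succ f ih =>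
    intro hi h1 h2
    by_cases hg : prodB hi < k
    · have hge := prodB_ge (r := hi) (by omega)
      simp only [doublingB, if_pos hg]
      exact ih (hi * 2) (by omega) (by omega)
    · simp only [doublingB, if_neg hg]
      exact ⟨h1, by omega⟩

-- binary search finds Rk k
theorem bsearchB_eq (k : Int) : ∀ (fuel : Nat) (lo hi : Int),
    0 ≤ lo → lo ≤ ((Rk k : Nat) : Int) → ((Rk k : Nat) : Int) ≤ hi →
    (hi - lo).toNat ≤ fuel →
    bsearchB k fuel lo hi = ((Rk k : Nat) : Int) := by
  intro fuel
  induction fuel with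
  | zero =>
    intro lo hi h0 h1 h2 hf
    simp only [bsearchB]
    omega
  | succ f ih =>
    intro lo hi h0 h1 h2 hf
    by_cases hlh : lo < hi
    · have hmid := PySem.Int.floordiv_two_mid_bounds (le_of_lt hlh)
      have hmlt : PySem.Int.floordiv (lo + hi) 2 < hi := by
        rw [PySem.Int.floordiv_lt_iff_lt_mul (by norm_num)]
        omega
      set mid := PySem.Int.floordiv (lo + hi) 2 with hmdef
      by_cases hp : prodB mid ≥ k
      · have hmn : mid = ((mid.toNat : Nat) : Int) := by omega
        have : Rk k ≤ mid.toNat := Rk_min (by rw [← prodB_natCast, ← hmn]; omega)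
        simp only [bsearchB, if_pos hlh, ← hmdef, if_pos hp]
        exact ih lo mid h0 h1 (by omega) (by omega)
      · have hmn : mid = ((mid.toNat : Nat) : Int) := by omega
        have : mid.toNat < Rk k := Rk_lt (by rw [← prodB_natCast, ← hmn]; omega)
        simp only [bsearchB, if_pos hlh, ← hmdef, if_neg hp]
        exact ih (mid + 1) hi (by omega) (by omega) h2 (by omega)
    · simp only [bsearchB, if_neg hlh]
      omega

-- the two renderings of the final counts agree
theorem render_eq (t : Nat) :
    PySem.Chars.join []
      ((PySem.List.enumerate (countsA t) 0).map
        (fun p => PySem.List.pyRepeat [PySem.List.pyGetD cfChars p.1 ' '] p.2)) =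
    PySem.Chars.join []
      ((PySem.List.enumerate cfChars 0).map
        (fun p => PySem.List.pyRepeat [p.2]
          (if p.1 < (((t % 10 : Nat)) : Int) then ((t / 10 : Nat) : Int) + 2
           else ((t / 10 : Nat) : Int) + 1))) := by
  have h10 : List.range 10 = [0,1,2,3,4,5,6,7,8,9] := by decide
  congr 1
  simp only [countsA, cfChars, h10, List.map, PySem.List.enumerate_cons, PySem.List.enumerate_nil,
    List.cons.injEq, and_true]
  refine ⟨?_,?_,?_,?_,?_,?_,?_,?_,?_,?_⟩ <;> (congr 1) <;>
    first
      | decide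
      | (split_ifs <;> omega)

theorem solve_eq (k : Int) : solve k = solve_alt k := by
  have hC0 : (List.range 10).map (fun _ => (1 : Int)) = countsA 0 := by decide
  have hm0 : PySem.Int.mod ((-1 : Int) + 1) 10 = (((0 : Nat) % 10 : Nat) : Int) := by decide
  have hloop : solveLoopA k k.toNat (countsA 0) (-1) = countsA (Rk k) :=
    loopA_eq k k.toNat 0 (-1) (Nat.zero_le _) (by have := Rk_le_toNat k; omega) hm0
  obtain ⟨hhi1, hhik⟩ := doublingB_spec k k.toNat 1 (le_refl _) (by omega)
  set hi := doublingB k k.toNat 1 with hhidef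
  have hhin : hi = ((hi.toNat : Nat) : Int) := by omega
  have hRhi : ((Rk k : Nat) : Int) ≤ hi := by
    have : Rk k ≤ hi.toNat := Rk_min (by rw [← prodB_natCast, ← hhin]; omega)
    omega
  have hbs : bsearchB k hi.toNat 0 hi = ((Rk k : Nat) : Int) :=
    bsearchB_eq k hi.toNat 0 hi (le_refl _) (by positivity) hRhi (by omega)
  have hq : PySem.Int.floordiv ((Rk k : Nat) : Int) 10 = ((Rk k / 10 : Nat) : Int) := by
    rw [PySem.Int.floordiv_eq_ediv_of_pos (by norm_num)]
    omega
  have hr : PySem.Int.mod ((Rk k : Nat) : Int) 10 = ((Rk k % 10 : Nat) : Int) := by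
    rw [PySem.Int.mod_eq_emod_of_pos (by norm_num)]
    omega
  show String.ofList (PySem.Chars.join []
      ((PySem.List.enumerate (solveLoopA k k.toNat ((List.range 10).map (fun _ => (1 : Int))) (-1)) 0).map
        (fun p => PySem.List.pyRepeat [PySem.List.pyGetD cfChars p.1 ' '] p.2))) =
    String.ofList (PySem.Chars.join []
      ((PySem.List.enumerate cfChars 0).map
        (fun p => PySem.List.pyRepeat [p.2]
          (if p.1 < PySem.Int.mod (bsearchB k hi.toNat 0 hi) 10
           then PySem.Int.floordiv (bsearchB k hi.toNat 0 hi) 10 + 2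
           else PySem.Int.floordiv (bsearchB k hi.toNat 0 hi) 10 + 1))))
  rw [hC0, hloop, hbs, hq, hr]
  exact congrArg String.ofList (render_eq (Rk k))

-- ===== VERDICT (by name: the statement is the Claim_ definition above) =====
theorem solve_spec : Claim_equal_solve := by
  intro k _
  unfold Spec_solve
  exact solve_eq k
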